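-- pv_equiv track=rewrite | github.com/lieeuwos/Primitive_annotations | Noise2.py | distr_guessed
-- ===== SOURCE A (Python) =====
-- def distr_guessed(y):
--     values = dict()
--     for i in y:
--         if values.get(str(i)) == None:
--             values[str(i)] = 1
--         else:
--             values[str(i)] = values[str(i)] + 1
--     return values #possible values
-- ===== SOURCE B (Python) =====
-- def distr_guessed(y):
--     keys = [str(i) for i in y]
--     counts = {}
--     run_key = None
--     run_len = 0
--     for k in sorted(keys):
--         if k == run_key:
--             run_len += 1
--         else:
--             if run_key is not None:
--                 counts[run_key] = run_len
--             run_key = k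
--             run_len = 1
--     if run_key is not None:
--         counts[run_key] = run_len
--     return {k: counts[k] for k in dict.fromkeys(keys)}
-- ===== Notes on version B (the rewrite author's own statement) =====
-- stated objective: alternative
-- what changed: Replaces the incremental hash-map tally with a sort-then-scan: sort the string keys, measure each run of equal keys in one linear scan to get the counts, then emit them in first-occurrence order via an ordered dedup.
import Mathlib
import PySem

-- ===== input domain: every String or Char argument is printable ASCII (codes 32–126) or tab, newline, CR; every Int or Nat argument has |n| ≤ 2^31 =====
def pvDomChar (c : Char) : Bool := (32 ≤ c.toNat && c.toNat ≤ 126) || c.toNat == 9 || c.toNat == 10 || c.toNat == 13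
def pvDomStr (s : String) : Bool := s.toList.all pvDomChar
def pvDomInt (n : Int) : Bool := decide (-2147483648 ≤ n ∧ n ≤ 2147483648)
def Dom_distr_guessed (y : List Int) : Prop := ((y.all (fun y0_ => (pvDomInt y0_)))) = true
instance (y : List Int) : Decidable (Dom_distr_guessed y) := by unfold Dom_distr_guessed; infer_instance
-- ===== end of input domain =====

-- B replaces A's incremental dict tally with a sort-then-scan over runs of equal string keys, emitted in first-occurrence order.


-- ===== PORT A =====
-- literal transliteration: values = dict(); for i in y: get/branch/insert; return values
def distr_guessed (y : List Int) : List (String × Int) :=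
  (y.foldl (fun (values : PySem.Dict String Int) i =>
    match values.get? (PySem.Int.toStr i) with
    | none => values.insert (PySem.Int.toStr i) 1
    | some v => values.insert (PySem.Int.toStr i) (v + 1)) PySem.Dict.empty).items

-- ===== PORT B =====
-- loop body of Source B: state is (counts, run_key : Optional, run_len); 'k == run_key' is False when run_key is None
def dgStep (st : PySem.Dict String Int × Option String × Int) (k : String) :
    PySem.Dict String Int × Option String × Int :=
  match st with
  | (counts, some rk, rl) =>
      if k = rk then (counts, some rk, rl + 1)
      else (counts.insert rk rl, some k, 1)
  | (counts, none, _) => (counts, some k, 1)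

-- the trailing 'if run_key is not None: counts[run_key] = run_len'
def dgFlush (st : PySem.Dict String Int × Option String × Int) : PySem.Dict String Int :=
  match st with
  | (counts, some rk, rl) => counts.insert rk rl
  | (counts, none, _) => counts

-- literal transliteration of Source B; 'counts[k]' is ported as getD with default 0, exact here since every
-- dedup key occurs in keys and hence is present in counts (no KeyError is reachable)
def distr_guessed_alt (y : List Int) : List (String × Int) :=
  let keys := y.map PySem.Int.toStr
  let counts := dgFlush ((PySem.List.sorted keys id false).foldl dgStep (PySem.Dict.empty, none, 0))
  (PySem.List.dedup keys).map (fun k => (k, counts.getD k 0))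

-- ===== PRECONDITION & SPEC =====
def Spec_distr_guessed (y : List Int) (out : List (String × Int)) : Prop := out = distr_guessed_alt y
instance (y : List Int) (out : List (String × Int)) : Decidable (Spec_distr_guessed y out) := by unfold Spec_distr_guessed; infer_instance

-- ===== CLAIM (what is proved, stated in full; the proofs are below) =====
def Claim_equal_distr_guessed : Prop := ∀ (y : List Int), Dom_distr_guessed y → Spec_distr_guessed y (distr_guessed y)

-- ===== LEMMAS AND PROOFS =====

-- A's per-element step is exactly the 'insert (getD 0 + 1)' counting step.
theorem distr_guessed_step_eq (values : PySem.Dict String Int) (k : String) :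
    (match values.get? k with
     | none => values.insert k 1
     | some v => values.insert k (v + 1)) = values.insert k (values.getD k 0 + 1) := by
  rcases h : values.get? k with _ | v <;>
    simp [PySem.Dict.getD_eq_get?_getD, h]

-- A's fold is the Counter of the string keys.
theorem distr_guessed_foldA (y : List Int) :
    distr_guessed y = (PySem.Dict.counter (y.map PySem.Int.toStr)).items := by
  unfold distr_guessed
  rw [← PySem.Dict.foldl_insert_getD_add_one_eq_counter, List.foldl_map]
  rw [show (fun (values : PySem.Dict String Int) i =>
      match values.get? (PySem.Int.toStr i) with
      | none => values.insert (PySem.Int.toStr i) 1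
      | some v => values.insert (PySem.Int.toStr i) (v + 1)) =
      (fun values i => values.insert (PySem.Int.toStr i) (values.getD (PySem.Int.toStr i) 0 + 1)) from
    funext fun d => funext fun i => distr_guessed_step_eq d (PySem.Int.toStr i)]

-- Invariant of B's run scan on a ≤-sorted tail whose elements all dominate the open run's key.
theorem dgScan_getD (l : List String) (hl : l.Pairwise (· ≤ ·))
    (d : PySem.Dict String Int) (rk : String) (rl : Int)
    (hdom : ∀ x ∈ l, rk ≤ x) (k : String) :
    (dgFlush (l.foldl dgStep (d, some rk, rl))).getD k 0 =
      (if k = rk then rl + (l.count rk : Int)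
       else if k ∈ l then (l.count k : Int)
       else d.getD k 0) := by
  induction l generalizing d rk rl with
  | nil =>
      simp only [List.foldl_nil, dgFlush, List.count_nil, List.not_mem_nil]
      rw [PySem.Dict.getD_insert]
      split_ifs <;> simp_all
  | cons x xs ih =>
      have hx : rk ≤ x := hdom x (List.mem_cons_self)
      have hxs : xs.Pairwise (· ≤ ·) := hl.of_cons
      by_cases hxk : x = rk
      · subst hxk
        simp only [List.foldl_cons, dgStep, if_pos rfl, if_true]
        rw [ih hxs d x (rl + 1) (fun z hz => List.rel_of_pairwise_cons hl hz)]
        by_cases h1 : k = x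
        · subst h1; simp [List.count_cons]; ring
        · simp [List.count_cons, h1, List.mem_cons, Ne.symm h1]
      · have hlt : rk < x := lt_of_le_of_ne hx (Ne.symm hxk)
        have hnot : rk ∉ x :: xs := by
          intro hmem
          rcases List.mem_cons.mp hmem with h | h
          · exact hxk h.symm
          · exact absurd (List.rel_of_pairwise_cons hl h) (not_le.mpr hlt)
        simp only [List.foldl_cons, dgStep, if_neg hxk]
        rw [ih hxs (d.insert rk rl) x 1 (fun z hz => List.rel_of_pairwise_cons hl hz)]
        by_cases h1 : k = x
        · subst h1
          simp [hxk, List.count_cons, List.count_eq_zero.mpr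
            (fun hm => hnot (List.mem_cons_of_mem _ hm))]
          omega
        · by_cases h2 : k ∈ xs
          · have hkrk : k ≠ rk := by
              intro h; exact hnot (h ▸ List.mem_cons_of_mem _ h2)
            simp [hkrk, h1, h2, List.count_cons, Ne.symm h1]
          · rw [PySem.Dict.getD_insert]
            by_cases h3 : k = rk
            · subst h3
              have : (x :: xs).count k = 0 :=
                List.count_eq_zero.mpr hnot
              simp [List.mem_cons, h1, h2, this]
            · simp [h3, List.mem_cons, h1, h2]

-- B's counts dict gives each key its multiplicity in the sorted key list.
theorem dgCounts_getD (ks : List String) (k : String) :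
    (dgFlush ((PySem.List.sorted ks id false).foldl dgStep (PySem.Dict.empty, none, 0))).getD k 0 =
      (ks.count k : Int) := by
  have hperm := PySem.List.sorted_perm ks id false
  rw [show (ks.count k : Int) = ((PySem.List.sorted ks id false).count k : Int) by
    rw [hperm.count_eq]]
  have hl : (PySem.List.sorted ks id false).Pairwise (· ≤ ·) :=
    PySem.List.sorted_pairwise ks id
  generalize PySem.List.sorted ks id false = l at hl ⊢
  cases l with
  | nil => simp [dgFlush, PySem.Dict.getD, PySem.Dict.get?, PySem.Dict.empty]
  | cons x xs =>
      simp only [List.foldl_cons, dgStep]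
      rw [dgScan_getD xs hl.of_cons PySem.Dict.empty x 1
        (fun z hz => List.rel_of_pairwise_cons hl hz) k]
      by_cases h1 : k = x
      · subst h1; simp [List.count_cons]; ring
      · by_cases h2 : k ∈ xs
        · simp [h1, h2, List.count_cons, Ne.symm h1]
        · have : (x :: xs).count k = 0 := by
            simp [List.count_eq_zero, List.mem_cons, h1, h2]
          simp [h1, h2, this, PySem.Dict.getD, PySem.Dict.get?, PySem.Dict.empty]

-- ===== VERDICT (by name: the statement is the Claim_ definition above) =====
theorem distr_guessed_spec : Claim_equal_distr_guessed := by
  intro y _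
  unfold Spec_distr_guessed distr_guessed_alt
  rw [distr_guessed_foldA, PySem.Dict.items_counter]
  simp only [← PySem.List.dedup_eq_ofList]
  apply List.map_congr_left
  intro k _
  rw [dgCounts_getD]
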